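-- pv_equiv track=rewrite | github.com/abdo-aary/quark | src/qrc/run/fmp_retriever.py | _masks_from_label
-- ===== SOURCE A (Python) =====
-- def _masks_from_label(label: str) -> tuple[int, int, int]:
--     """Convert a Pauli label into bitmasks for fast expectation evaluation.
--
--     The label follows Qiskit's convention:
--
--     - leftmost character corresponds to qubit ``n-1``
--     - rightmost character corresponds to qubit ``0``
--
--     We convert this to (xmask, zmask, ny) such that the Pauli operator acts as:
--
--     ``P |x⟩ = i^{ny} (-1)^{popcount(zmask & x)} |x ⊕ xmask⟩``
--
--     Parameters
--     ----------
--     label : str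
--         Pauli string composed of characters in {'I','X','Y','Z'}.
--
--     Returns
--     -------
--     tuple[int, int, int]
--         ``(xmask, zmask, ny)``, where:
--         - ``xmask`` has 1s on qubits with X or Y
--         - ``zmask`` has 1s on qubits with Z or Y
--         - ``ny`` is the number of Y's (phase factor ``i^{ny}``)
--     """
--     n = len(label)
--     xmask = 0
--     zmask = 0
--     ny = 0
--     for q in range(n):
--         ch = label[n - 1 - q]  # qubit 0 is rightmost character
--         if ch == "X":
--             xmask |= (1 << q)
--         elif ch == "Z":
--             zmask |= (1 << q)
--         elif ch == "Y":
--             xmask |= (1 << q)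
--             zmask |= (1 << q)
--             ny += 1
--     return xmask, zmask, ny
-- ===== SOURCE B (Python) =====
-- def _masks_from_label(label: str) -> tuple[int, int, int]:
--     """Staged passes: render each mask as a binary string and parse it with
--     int(s, 2) (leftmost char = high bit = qubit n-1); count the Y's separately."""
--     if not label:
--         return (0, 0, 0)
--     xmask = int("".join("1" if c in "XY" else "0" for c in label), 2)
--     zmask = int("".join("1" if c in "ZY" else "0" for c in label), 2)
--     ny = sum(c == "Y" for c in label)
--     return xmask, zmask, ny
-- ===== Notes on version B (the rewrite author's own statement) =====
-- stated objective: idiomatic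
-- what changed: Replaces the fused right-to-left bit-shift/OR loop by staged passes: each mask is rendered as a '0'/'1' string and parsed with int(s,2), and ny is a separate sum over the characters, with an explicit empty-label guard.
import Mathlib
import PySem

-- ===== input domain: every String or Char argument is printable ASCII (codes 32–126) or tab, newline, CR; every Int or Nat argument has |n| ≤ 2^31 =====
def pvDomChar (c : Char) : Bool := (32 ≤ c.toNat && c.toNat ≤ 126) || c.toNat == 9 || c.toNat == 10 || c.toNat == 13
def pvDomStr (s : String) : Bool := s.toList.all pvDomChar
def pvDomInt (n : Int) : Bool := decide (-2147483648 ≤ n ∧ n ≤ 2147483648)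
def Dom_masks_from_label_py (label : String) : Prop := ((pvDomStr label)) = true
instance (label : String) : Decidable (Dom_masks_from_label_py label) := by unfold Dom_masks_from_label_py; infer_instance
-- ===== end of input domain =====

-- B replaces A's fused right-to-left shift/OR loop by staged passes: each mask rendered
-- as a '0'/'1' string and parsed as binary, ny as a separate sum; more idiomatic, same cost.

-- ===== PORT A =====
-- literal port of A: q runs over range(n), reads label[n-1-q], ORs 1<<q into the masks
def masks_from_label_py (label : String) : Int × Int × Int :=
  let cs := label.toList
  let n : Int := PySem.Str.len label
  (PySem.List.pyRange 0 n).foldl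
    (fun (st : Int × Int × Int) q =>
      let ch : Char := PySem.List.pyGetD cs (n - 1 - q) ' '  -- label[n-1-q]: index always in range
      if ch = 'X' then (PySem.Int.bor st.1 (1 <<< q.toNat), st.2.1, st.2.2)
      else if ch = 'Z' then (st.1, PySem.Int.bor st.2.1 (1 <<< q.toNat), st.2.2)
      else if ch = 'Y' then
        (PySem.Int.bor st.1 (1 <<< q.toNat), PySem.Int.bor st.2.1 (1 <<< q.toNat), st.2.2 + 1)
      else st)
    (0, 0, 0)

-- ===== PORT B =====
-- hand port of int(s, 2): exact for strings made only of '0'/'1' digits, which is all B feeds it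
def parseBin (s : List Char) : Int :=
  s.foldl (fun acc c => 2 * acc + (if c = '1' then 1 else 0)) 0

-- literal port of B: empty guard, then two mapped '0'/'1' strings parsed as binary, plus a sum
def masks_from_label_py_alt (label : String) : Int × Int × Int :=
  if label.toList.isEmpty then (0, 0, 0)
  else
    (parseBin (label.toList.map (fun c => if c = 'X' ∨ c = 'Y' then '1' else '0')),
     parseBin (label.toList.map (fun c => if c = 'Z' ∨ c = 'Y' then '1' else '0')),
     (label.toList.map (fun c => if c = 'Y' then (1 : Int) else 0)).sum)

-- ===== PRECONDITION & SPEC =====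
def Spec_masks_from_label_py (label : String) (out : Int × Int × Int) : Prop := out = masks_from_label_py_alt label
instance (label : String) (out : Int × Int × Int) : Decidable (Spec_masks_from_label_py label out) := by unfold Spec_masks_from_label_py; infer_instance

-- ===== CLAIM (what is proved, stated in full; the proofs are below) =====
def Claim_equal_masks_from_label_py : Prop := ∀ (label : String), Dom_masks_from_label_py label → Spec_masks_from_label_py label (masks_from_label_py label)

-- ===== LEMMAS AND PROOFS =====

-- per-character bit contributions
def bitX (c : Char) : Int := if c = 'X' ∨ c = 'Y' then 1 else 0
def bitZ (c : Char) : Int := if c = 'Z' ∨ c = 'Y' then 1 else 0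
def bitY (c : Char) : Int := if c = 'Y' then 1 else 0

-- masks of a character list read LOW BIT FIRST (i.e. of the reversed label)
def hm : List Char → Int × Int × Int
  | [] => (0, 0, 0)
  | c :: t => (bitX c + 2 * (hm t).1, bitZ c + 2 * (hm t).2.1, bitY c + (hm t).2.2)

-- A's loop body, named for the induction
def stepA (cs : List Char) (st : Int × Int × Int) (q : Int) : Int × Int × Int :=
  if PySem.List.pyGetD cs ((cs.length : Int) - 1 - q) ' ' = 'X' then
    (PySem.Int.bor st.1 (1 <<< q.toNat), st.2.1, st.2.2)
  else if PySem.List.pyGetD cs ((cs.length : Int) - 1 - q) ' ' = 'Z' then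
    (st.1, PySem.Int.bor st.2.1 (1 <<< q.toNat), st.2.2)
  else if PySem.List.pyGetD cs ((cs.length : Int) - 1 - q) ' ' = 'Y' then
    (PySem.Int.bor st.1 (1 <<< q.toNat), PySem.Int.bor st.2.1 (1 <<< q.toNat), st.2.2 + 1)
  else st

lemma hm_bounds (l : List Char) :
    0 ≤ (hm l).1 ∧ (hm l).1 < 2 ^ l.length ∧ 0 ≤ (hm l).2.1 ∧ (hm l).2.1 < 2 ^ l.length := by
  induction l with
  | nil => simp [hm]
  | cons c t ih =>
    have hp : (0:Int) < 2 ^ t.length := by positivity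
    have hx : 0 ≤ bitX c ∧ bitX c ≤ 1 := by unfold bitX; split_ifs <;> omega
    have hz : 0 ≤ bitZ c ∧ bitZ c ≤ 1 := by unfold bitZ; split_ifs <;> omega
    simp only [hm, List.length_cons, pow_succ]
    constructor
    · omega
    constructor
    · nlinarith [ih.1, ih.2.1, hx.1, hx.2]
    constructor
    · omega
    · nlinarith [ih.2.2.1, ih.2.2.2, hz.1, hz.2]

lemma hm_snoc (l : List Char) (c : Char) :
    hm (l ++ [c]) = ((hm l).1 + bitX c * 2 ^ l.length,
                     (hm l).2.1 + bitZ c * 2 ^ l.length,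
                     (hm l).2.2 + bitY c) := by
  induction l with
  | nil => simp [hm]
  | cons d t ih =>
    simp only [List.cons_append, hm, ih, List.length_cons, pow_succ]
    refine Prod.ext ?_ (Prod.ext ?_ ?_) <;> simp <;> ring

lemma nat_or_two_pow (m k : Nat) (h : m < 2 ^ k) : m ||| 2 ^ k = m + 2 ^ k := by
  have h1 : (m ||| 2 ^ k) % 2 ^ k = m := by
    rw [Nat.or_mod_two_pow]; simp [Nat.mod_eq_of_lt h]
  have h2 : (m ||| 2 ^ k) / 2 ^ k = 1 := by
    rw [Nat.or_div_two_pow]; simp [Nat.div_eq_of_lt h]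
  have := Nat.div_add_mod (m ||| 2 ^ k) (2 ^ k)
  rw [h1, h2] at this; omega

lemma bor_two_pow (a : Int) (k : Nat) (h0 : 0 ≤ a) (h : a < 2 ^ k) :
    PySem.Int.bor a (1 <<< k) = a + 2 ^ k := by
  obtain ⟨m, rfl⟩ := Int.eq_ofNat_of_zero_le h0
  have hm : m < 2 ^ k := by exact_mod_cast h
  have hs : (1 <<< k : Nat) = 2 ^ k := by simp [Nat.shiftLeft_eq]
  rw [PySem.Int.bor_natCast, hs, nat_or_two_pow m k hm]
  push_cast; ring

lemma A_loop (cs : List Char) (k : Nat) (hk : k ≤ cs.length) :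
    (PySem.List.pyRange 0 (k : Int)).foldl (stepA cs) (0, 0, 0) = hm (cs.reverse.take k) := by
  induction k with
  | zero => simp [PySem.List.pyRange, hm]
  | succ k ih =>
    have hk' : k ≤ cs.length := Nat.le_of_succ_le hk
    have hkc : k < cs.length := hk
    have hrange : PySem.List.pyRange 0 ((k + 1 : Nat) : Int)
        = PySem.List.pyRange 0 (k : Int) ++ [(k : Int)] := by
      have h : ((k + 1 : Nat) : Int) = (k : Int) + 1 := by push_cast; ring
      rw [h, PySem.List.pyRange_one_succ_right (by positivity)]
    rw [hrange, List.foldl_append, ih hk']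
    have hklt : k < cs.reverse.length := by simpa using hkc
    -- the character read at step k is cs.reverse[k]
    have hch : PySem.List.pyGetD cs ((cs.length : Int) - 1 - (k : Int)) ' ' = cs.reverse[k] := by
      have h0 : (0 : Int) ≤ (cs.length : Int) - 1 - (k : Int) := by omega
      have h1 : (cs.length : Int) - 1 - (k : Int) < (cs.length : Int) := by omega
      rw [PySem.List.pyGetD_eq_getElem cs ' ' h0 h1, List.getElem_reverse]
      congr 1
      omega
    have htake : cs.reverse.take (k + 1) = cs.reverse.take k ++ [cs.reverse[k]] := by
      rw [List.take_add_one, List.getElem?_eq_getElem hklt]; rfl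
    have hlen : (cs.reverse.take k).length = k := by
      rw [List.length_take]; omega
    obtain ⟨hx0, hx1, hz0, hz1⟩ := hm_bounds (cs.reverse.take k)
    rw [hlen] at hx1 hz1
    rw [htake, hm_snoc, hlen]
    simp only [List.foldl_cons, List.foldl_nil, stepA, hch, Int.toNat_natCast]
    by_cases hX : cs.reverse[k] = 'X'
    · rw [if_pos hX, bor_two_pow _ k hx0 hx1]
      simp [bitX, bitZ, bitY, hX]
    · rw [if_neg hX]
      by_cases hZ : cs.reverse[k] = 'Z'
      · rw [if_pos hZ, bor_two_pow _ k hz0 hz1]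
        simp [bitX, bitZ, bitY, hZ]
      · rw [if_neg hZ]
        by_cases hY : cs.reverse[k] = 'Y'
        · rw [if_pos hY, bor_two_pow _ k hx0 hx1, bor_two_pow _ k hz0 hz1]
          simp [bitX, bitZ, bitY, hY]
        · rw [if_neg hY]
          rw [List.getElem_reverse] at hX hZ hY
          simp [bitX, bitZ, bitY, hX, hZ, hY]

-- B-side: parseBin of a snoc, then each staged pass equals the matching component of hm ∘ reverse
lemma parseBin_snoc (u : List Char) (d : Char) :
    parseBin (u ++ [d]) = 2 * parseBin u + (if d = '1' then 1 else 0) := by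
  unfold parseBin
  rw [List.foldl_append]
  simp

lemma parseX_eq (l : List Char) :
    parseBin (l.map (fun c => if c = 'X' ∨ c = 'Y' then '1' else '0')) = (hm l.reverse).1 := by
  induction l using List.reverseRecOn with
  | nil => simp [parseBin, hm]
  | append_singleton t c ih =>
    rw [List.map_append, List.map_singleton, parseBin_snoc, ih, List.reverse_append]
    simp only [List.reverse_singleton, List.singleton_append, hm, bitX]
    split_ifs <;> (simp_all; try ring)

lemma parseZ_eq (l : List Char) :
    parseBin (l.map (fun c => if c = 'Z' ∨ c = 'Y' then '1' else '0')) = (hm l.reverse).2.1 := by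
  induction l using List.reverseRecOn with
  | nil => simp [parseBin, hm]
  | append_singleton t c ih =>
    rw [List.map_append, List.map_singleton, parseBin_snoc, ih, List.reverse_append]
    simp only [List.reverse_singleton, List.singleton_append, hm, bitZ]
    split_ifs <;> (simp_all; try ring)

lemma sumY_eq (l : List Char) :
    (l.map (fun c => if c = 'Y' then (1 : Int) else 0)).sum = (hm l.reverse).2.2 := by
  induction l with
  | nil => simp [hm]
  | cons c t ih =>
    simp only [List.map_cons, List.sum_cons, List.reverse_cons]
    rw [hm_snoc, ih, bitY]
    ring

-- ===== VERDICT (by name: the statement is the Claim_ definition above) =====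
theorem masks_from_label_py_spec : Claim_equal_masks_from_label_py := by
  intro label _
  unfold Spec_masks_from_label_py masks_from_label_py
  show (PySem.List.pyRange 0 (PySem.Str.len label)).foldl (stepA label.toList) (0, 0, 0)
      = masks_from_label_py_alt label
  rw [PySem.Str.len_eq, A_loop label.toList label.toList.length (le_refl _)]
  rw [List.take_of_length_le (by simp)]
  unfold masks_from_label_py_alt
  by_cases h : label.toList.isEmpty
  · rw [if_pos h]
    rw [List.isEmpty_iff] at h
    simp [h, hm]
  · rw [if_neg h, parseX_eq, parseZ_eq, sumY_eq]
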